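-- pv_equiv track=rewrite | github.com/TincyThomas/301-Days-of-Problem-Solving | Hold Your Breath!.py | diving_minigame
-- ===== SOURCE A (Python) =====
-- def diving_minigame(lst):
-- 	a = 10
-- 	for i in lst:
-- 		if i < 0:
-- 			a = a - 2
-- 		else:
-- 			a = a + 2
-- 	return False if a ==0 else True
-- ===== SOURCE B (Python) =====
-- def diving_minigame(lst):
--     neg = sum(1 for i in lst if i < 0)
--     return 2 * neg != len(lst) + 5
-- ===== Notes on version B (the rewrite author's own statement) =====
-- stated objective: simpler
-- what changed: Replaces the running +/-2 counter with a count of negative elements and the closed-form test 2*neg != len(lst)+5.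
import Mathlib
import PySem

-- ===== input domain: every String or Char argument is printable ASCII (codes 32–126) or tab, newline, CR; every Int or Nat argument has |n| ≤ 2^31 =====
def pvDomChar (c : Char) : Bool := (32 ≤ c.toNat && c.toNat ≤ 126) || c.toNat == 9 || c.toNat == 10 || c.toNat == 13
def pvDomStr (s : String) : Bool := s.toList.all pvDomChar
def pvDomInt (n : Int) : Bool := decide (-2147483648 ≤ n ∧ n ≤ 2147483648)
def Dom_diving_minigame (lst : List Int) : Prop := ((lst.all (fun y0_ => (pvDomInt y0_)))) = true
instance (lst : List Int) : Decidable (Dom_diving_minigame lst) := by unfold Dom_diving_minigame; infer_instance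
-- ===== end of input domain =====

-- B replaces A's running ±2 counter by counting negatives and one closed-form comparison (objective: simpler).

-- ===== PORT A =====
def diving_minigame (lst : List Int) : Bool :=
  let a : Int := lst.foldl (fun a i => if i < 0 then a - 2 else a + 2) 10
  if a == 0 then false else true

-- ===== PORT B =====
def diving_minigame_alt (lst : List Int) : Bool :=
  let neg : Int := ((lst.filter (fun i => i < 0)).length : Int)
  2 * neg != (lst.length : Int) + 5

-- ===== PRECONDITION & SPEC =====
def Spec_diving_minigame (lst : List Int) (out : Bool) : Prop := out = diving_minigame_alt lst
instance (lst : List Int) (out : Bool) : Decidable (Spec_diving_minigame lst out) := by unfold Spec_diving_minigame; infer_instance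

-- ===== CLAIM (what is proved, stated in full; the proofs are below) =====
def Claim_equal_diving_minigame : Prop := ∀ (lst : List Int), Dom_diving_minigame lst → Spec_diving_minigame lst (diving_minigame lst)

-- ===== LEMMAS AND PROOFS =====
theorem diving_minigame_foldl (lst : List Int) (a : Int) :
    lst.foldl (fun a i => if i < 0 then a - 2 else a + 2) a
      = a + 2 * (lst.length : Int) - 4 * ((lst.filter (fun i => i < 0)).length : Int) := by
  induction lst generalizing a with
  | nil => simp
  | cons x xs ih =>
    simp only [List.foldl_cons, List.filter_cons, List.length_cons]
    by_cases h : x < 0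
    · simp [h, ih]; push_cast; ring
    · simp [h, ih]; push_cast; ring

-- ===== VERDICT (by name: the statement is the Claim_ definition above) =====
theorem diving_minigame_spec : Claim_equal_diving_minigame := by
  intro lst _
  unfold Spec_diving_minigame diving_minigame diving_minigame_alt
  simp only [diving_minigame_foldl]
  by_cases h : (10 : Int) + 2 * (lst.length : Int) - 4 * ((lst.filter (fun i => i < 0)).length : Int) = 0
  · simp [h]
    omega
  · simp [h]
    omega
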